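-- pv_equiv track=rewrite | github.com/hannahgz/set-transformer | src_clean/mlp_hist_peak.py | count_combinations
-- ===== SOURCE A (Python) =====
-- from itertools import combinations
--
-- def count_combinations(numbers):
--     """
--     Counts how many 3-number combinations from a list of 5 numbers
--     have all numbers either all the same or all different.
--     """
--     same_count = 0
--     diff_count = 0
--
--     # Iterate through all 5 choose 3 combinations
--     for comb in combinations(numbers, 3):
--         # Check if the combination is all the same
--         if len(set(comb)) == 1:
--             same_count += 1
--         # Check if the combination is all different
--         elif len(set(comb)) == 3:
--             diff_count += 1
--
--     return same_count, diff_count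
-- ===== SOURCE B (Python) =====
-- def count_combinations(numbers):
--     """One-pass DP: for each new element, add the number of earlier equal pairs
--     (all-same triples) and of earlier distinct pairs avoiding its value (all-different)."""
--     cnt = {}   # value -> occurrences so far
--     eqp = {}   # value -> number of earlier pairs both equal to value
--     dp = 0     # number of earlier pairs with two distinct values
--     n = 0      # elements seen so far
--     same = 0
--     diff = 0
--     for v in numbers:
--         c = cnt.get(v, 0)
--         same += eqp.get(v, 0)
--         diff += dp - c * (n - c)
--         eqp[v] = eqp.get(v, 0) + c
--         dp += n - c
--         cnt[v] = c + 1
--         n += 1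
--     return same, diff
-- ===== Notes on version B (the rewrite author's own statement) =====
-- stated objective: faster
-- what changed: Replaced A's enumeration of all C(n,3) 3-combinations with a single pass that keeps per-value occurrence counts, per-value equal-pair counts and a running distinct-pair count, adding for each new element the earlier equal pairs of its value (all-same triples) and the earlier distinct pairs avoiding its value (all-different triples).
import Mathlib
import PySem

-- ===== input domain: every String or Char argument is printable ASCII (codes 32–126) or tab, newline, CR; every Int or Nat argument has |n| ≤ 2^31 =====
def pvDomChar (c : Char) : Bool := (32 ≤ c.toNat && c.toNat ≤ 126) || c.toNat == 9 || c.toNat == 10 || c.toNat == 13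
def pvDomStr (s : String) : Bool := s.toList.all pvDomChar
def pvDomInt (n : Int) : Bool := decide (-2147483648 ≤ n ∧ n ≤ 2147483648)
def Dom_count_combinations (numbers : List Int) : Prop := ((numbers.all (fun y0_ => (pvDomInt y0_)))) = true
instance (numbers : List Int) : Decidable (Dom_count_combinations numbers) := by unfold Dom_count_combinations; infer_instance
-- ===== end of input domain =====

-- B replaces A's enumeration of all 3-combinations with a one-pass counting DP
-- (earlier equal pairs / earlier distinct pairs per value); objective: faster.

-- ===== PORT A =====
-- itertools.combinations(xs, 2): pairs in lexicographic position order
def combs2 (xs : List Int) : List (Int × Int) :=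
  match xs with
  | [] => []
  | x :: rest => rest.map (fun b => (x, b)) ++ combs2 rest

-- itertools.combinations(xs, 3)
def combs3 (xs : List Int) : List (Int × Int × Int) :=
  match xs with
  | [] => []
  | x :: rest => (combs2 rest).map (fun p => (x, p.1, p.2)) ++ combs3 rest

def astep (st : Int × Int) (t : Int × Int × Int) : Int × Int :=
  if PySem.Set.len (PySem.Set.ofList [t.1, t.2.1, t.2.2]) == 1 then (st.1 + 1, st.2)
  else if PySem.Set.len (PySem.Set.ofList [t.1, t.2.1, t.2.2]) == 3 then (st.1, st.2 + 1)
  else st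

def count_combinations (numbers : List Int) : Int × Int :=
  (combs3 numbers).foldl astep (0, 0)

-- ===== PORT B =====
-- state: (cnt, eqp, dp, n, same, diff) as in Source B's loop body
def bstep (s : PySem.Dict Int Int × PySem.Dict Int Int × Int × Int × Int × Int) (v : Int) :
    PySem.Dict Int Int × PySem.Dict Int Int × Int × Int × Int × Int :=
  match s with
  | (cnt, eqp, dp, n, same, diff) =>
    let c := cnt.getD v 0
    (cnt.insert v (c + 1), eqp.insert v (eqp.getD v 0 + c), dp + (n - c), n + 1,
     same + eqp.getD v 0, diff + (dp - c * (n - c)))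

def count_combinations_alt (numbers : List Int) : Int × Int :=
  let st := numbers.foldl bstep (PySem.Dict.empty, PySem.Dict.empty, 0, 0, 0, 0)
  (st.2.2.2.2.1, st.2.2.2.2.2)

-- ===== PRECONDITION & SPEC =====
def Spec_count_combinations (numbers : List Int) (out : Int × Int) : Prop := out = count_combinations_alt numbers
instance (numbers : List Int) (out : Int × Int) : Decidable (Spec_count_combinations numbers out) := by unfold Spec_count_combinations; infer_instance

-- ===== CLAIM (what is proved, stated in full; the proofs are below) =====
def Claim_equal_count_combinations : Prop := ∀ (numbers : List Int), Dom_count_combinations numbers → Spec_count_combinations numbers (count_combinations numbers)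

-- ===== LEMMAS AND PROOFS =====

-- spec-side counting functions
def isSame (t : Int × Int × Int) : Bool := decide (t.1 = t.2.1) && decide (t.2.1 = t.2.2)
def isDiff (t : Int × Int × Int) : Bool := decide (¬ t.1 = t.2.1) && (decide (¬ t.1 = t.2.2) && decide (¬ t.2.1 = t.2.2))
def sCount (xs : List Int) : Nat := (combs3 xs).countP isSame
def dCount (xs : List Int) : Nat := (combs3 xs).countP isDiff
def q2eq (xs : List Int) (y : Int) : Nat := (combs2 xs).countP (fun p => decide (p.1 = p.2) && decide (p.2 = y))
def p2d (xs : List Int) : Nat := (combs2 xs).countP (fun p => decide (¬ p.1 = p.2))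
def q2dAvoid (xs : List Int) (y : Int) : Nat :=
  (combs2 xs).countP (fun p => decide (¬ p.1 = p.2) && (decide (¬ p.1 = y) && decide (¬ p.2 = y)))
def p2dTouch (xs : List Int) (y : Int) : Nat :=
  (combs2 xs).countP (fun p => decide (¬ p.1 = p.2) && (decide (p.1 = y) || decide (p.2 = y)))

lemma setlen_one (a b c : Int) :
    (PySem.Set.len (PySem.Set.ofList [a, b, c]) == 1) = (decide (a = b) && decide (b = c)) := by
  by_cases hab : a = b <;> by_cases hac : a = c <;> by_cases hbc : b = c <;>
    simp [PySem.Set.ofList, PySem.Set.add, PySem.Set.len, hab, hac, hbc] <;>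
    split_ifs <;> simp_all <;> omega

lemma setlen_three (a b c : Int) :
    (PySem.Set.len (PySem.Set.ofList [a, b, c]) == 3)
      = (decide (¬ a = b) && (decide (¬ a = c) && decide (¬ b = c))) := by
  by_cases hab : a = b <;> by_cases hac : a = c <;> by_cases hbc : b = c <;>
    simp [PySem.Set.ofList, PySem.Set.add, PySem.Set.len, hab, hac, hbc] <;>
    split_ifs <;> simp_all <;> omega

-- A's fold counts isSame / isDiff triples
lemma foldA (L : List (Int × Int × Int)) (s d : Int) :
    L.foldl astep (s, d)
      = (s + (L.countP isSame : Int), d + (L.countP isDiff : Int)) := by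
  induction L generalizing s d with
  | nil => simp
  | cons t L ih =>
    obtain ⟨a, b, c⟩ := t
    rw [List.foldl_cons]
    have hstep : astep (s, d) (a, b, c)
        = (s + if isSame (a, b, c) then 1 else 0, d + if isDiff (a, b, c) then 1 else 0) := by
      unfold astep
      simp only [setlen_one, setlen_three]
      by_cases hab : a = b <;> by_cases hac : a = c <;> by_cases hbc : b = c <;>
        simp [isSame, isDiff, hab, hac, hbc]
    rw [hstep, ih, List.countP_cons, List.countP_cons]
    by_cases h1 : isSame (a, b, c) = true <;> by_cases h2 : isDiff (a, b, c) = true <;>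
      simp [h1, h2] <;> (try (push_cast ; ring)) <;> trivial

lemma countA (xs : List Int) :
    count_combinations xs = ((sCount xs : Int), (dCount xs : Int)) := by
  simpa [count_combinations, sCount, dCount] using foldA (combs3 xs) 0 0

-- snoc counting lemmas
lemma combs2_snoc_countP (xs : List Int) (y : Int) (p : Int × Int → Bool) :
    (combs2 (xs ++ [y])).countP p = (combs2 xs).countP p + xs.countP (fun a => p (a, y)) := by
  induction xs with
  | nil => simp [combs2]
  | cons x xs ih =>
    simp [combs2, List.countP_append, List.countP_map, ih, List.countP_cons, Function.comp_def]
    omega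

lemma combs3_snoc_countP (xs : List Int) (y : Int) (q : Int × Int × Int → Bool) :
    (combs3 (xs ++ [y])).countP q
      = (combs3 xs).countP q + (combs2 xs).countP (fun p => q (p.1, p.2, y)) := by
  induction xs with
  | nil => simp [combs3, combs2]
  | cons x xs ih =>
    simp [combs3, List.countP_append, List.countP_map, ih, combs2_snoc_countP, Function.comp_def,
      combs2]
    omega

lemma sCount_snoc (xs : List Int) (y : Int) : sCount (xs ++ [y]) = sCount xs + q2eq xs y := by
  simpa [sCount, q2eq, isSame] using combs3_snoc_countP xs y isSame

lemma dCount_snoc (xs : List Int) (y : Int) : dCount (xs ++ [y]) = dCount xs + q2dAvoid xs y := by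
  simpa [dCount, q2dAvoid, isDiff] using combs3_snoc_countP xs y isDiff

lemma countP_partition (l : List (Int × Int)) (p q : (Int × Int) → Bool) :
    l.countP p = l.countP (fun a => p a && q a) + l.countP (fun a => p a && !q a) := by
  induction l with
  | nil => simp
  | cons x l ih =>
    by_cases hp : p x <;> by_cases hq : q x <;> simp [List.countP_cons, hp, hq, ih] <;> omega

lemma p2d_split (xs : List Int) (y : Int) : p2d xs = q2dAvoid xs y + p2dTouch xs y := by
  unfold p2d q2dAvoid p2dTouch
  rw [countP_partition (combs2 xs) _ (fun p => decide (p.1 = y) || decide (p.2 = y))]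
  rw [List.countP_congr (l := combs2 xs)
        (p := fun p => decide (¬ p.1 = p.2) && !(decide (p.1 = y) || decide (p.2 = y)))
        (q := fun p => decide (¬ p.1 = p.2) && (decide (¬ p.1 = y) && decide (¬ p.2 = y)))
        (fun p _ => by
          by_cases h1 : p.1 = p.2 <;> by_cases h2 : p.1 = y <;> by_cases h3 : p.2 = y <;>
            simp [h1, h2, h3])]
  omega

lemma count_eq_countP' (xs : List Int) (y : Int) :
    xs.count y = xs.countP (fun b => decide (b = y)) := by
  rw [List.count_eq_countP]
  apply List.countP_congr
  intro a _
  simp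

lemma countP_ne_eq (xs : List Int) (y : Int) :
    xs.countP (fun b => decide (¬ b = y)) = xs.length - xs.count y := by
  have hlen := List.length_eq_countP_add_countP (l := xs) (fun b => decide (b = y))
  have hbr : xs.countP (fun a => decide ¬(decide (a = y) = true)) = xs.countP (fun b => decide (¬ b = y)) := by
    apply List.countP_congr
    intro a _
    by_cases h : a = y <;> simp [h]
  have hc := count_eq_countP' xs y
  omega

lemma p2dTouch_eq (xs : List Int) (y : Int) :
    p2dTouch xs y = xs.count y * (xs.length - xs.count y) := by
  induction xs with
  | nil => simp [p2dTouch, combs2]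
  | cons x xs ih =>
    have hcle : xs.count y ≤ xs.length := List.count_le_length
    unfold p2dTouch at ih ⊢
    simp only [combs2, List.countP_append, List.countP_map, Function.comp_def, ih]
    by_cases hx : x = y
    · have h1 : xs.countP (fun b => decide (¬ (x, b).1 = (x, b).2) && (decide ((x, b).1 = y) || decide ((x, b).2 = y)))
          = xs.countP (fun b => decide (¬ b = y)) := by
        apply List.countP_congr
        intro b _
        by_cases hb : b = y <;> simp [hx, hb] <;> omega
      rw [h1, countP_ne_eq]
      simp only [hx, List.count_cons_self, List.length_cons]
      have : (xs.count y + 1) * (xs.length + 1 - (xs.count y + 1)) = xs.count y * (xs.length - xs.count y) + (xs.length - xs.count y) := by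
        have h4 : xs.length + 1 - (xs.count y + 1) = xs.length - xs.count y := by omega
        rw [h4, Nat.succ_mul]
      omega
    · have h1 : xs.countP (fun b => decide (¬ (x, b).1 = (x, b).2) && (decide ((x, b).1 = y) || decide ((x, b).2 = y)))
          = xs.countP (fun b => decide (b = y)) := by
        apply List.countP_congr
        intro b _
        by_cases hb : b = y <;> simp [hx, hb] <;> omega
      rw [h1, ← count_eq_countP']
      rw [List.count_cons_of_ne (by omega), List.length_cons]
      have : xs.count y * (xs.length + 1 - xs.count y) = xs.count y * (xs.length - xs.count y) + xs.count y := by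
        have h3 : xs.length + 1 - xs.count y = (xs.length - xs.count y) + 1 := by omega
        rw [h3, Nat.mul_succ]
      omega

lemma q2eq_snoc (xs : List Int) (y v : Int) :
    q2eq (xs ++ [y]) v = q2eq xs v + if v = y then xs.count y else 0 := by
  unfold q2eq
  rw [combs2_snoc_countP]
  by_cases hv : v = y
  · have h1 : xs.countP (fun a => decide ((a, y).1 = (a, y).2) && decide ((a, y).2 = v))
        = xs.countP (fun b => decide (b = y)) := by
      apply List.countP_congr
      intro a _
      by_cases ha : a = y <;> simp [hv, ha]
    rw [h1, ← count_eq_countP']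
    simp [hv]
  · have h1 : xs.countP (fun a => decide ((a, y).1 = (a, y).2) && decide ((a, y).2 = v)) = 0 := by
      rw [List.countP_eq_zero]
      intro a _
      simp
      intro h
      omega
    rw [h1]
    simp [hv]

lemma p2d_snoc (xs : List Int) (y : Int) :
    p2d (xs ++ [y]) = p2d xs + (xs.length - xs.count y) := by
  unfold p2d
  rw [combs2_snoc_countP]
  have h1 : xs.countP (fun a => decide (¬ (a, y).1 = (a, y).2))
      = xs.countP (fun b => decide (¬ b = y)) := by
    apply List.countP_congr
    intro a _
    simp
  rw [h1, countP_ne_eq]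

-- invariant of B's fold
def BInv (xs : List Int) (st : PySem.Dict Int Int × PySem.Dict Int Int × Int × Int × Int × Int) : Prop :=
  (∀ v, st.1.getD v 0 = (xs.count v : Int)) ∧
  (∀ v, st.2.1.getD v 0 = (q2eq xs v : Int)) ∧
  st.2.2.1 = (p2d xs : Int) ∧
  st.2.2.2.1 = (xs.length : Int) ∧
  st.2.2.2.2.1 = (sCount xs : Int) ∧
  st.2.2.2.2.2 = (dCount xs : Int)

lemma inv_foldl (xs : List Int) :
    BInv xs (xs.foldl bstep (PySem.Dict.empty, PySem.Dict.empty, 0, 0, 0, 0)) := by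
  induction xs using List.reverseRecOn with
  | nil =>
    refine ⟨fun v => ?_, fun v => ?_, ?_, ?_, ?_, ?_⟩ <;>
      simp [PySem.Dict.getD_empty, q2eq, p2d, sCount, dCount, combs2, combs3]
  | append_singleton xs y ih =>
    obtain ⟨hcnt, heqp, hdp, hn, hs, hd⟩ := ih
    rw [List.foldl_append]
    set st := xs.foldl bstep (PySem.Dict.empty, PySem.Dict.empty, 0, 0, 0, 0) with hst
    obtain ⟨cnt, eqp, dp, n, same, diff⟩ := st
    simp only [List.foldl_cons, List.foldl_nil, bstep]
    have hcle : xs.count y ≤ xs.length := List.count_le_length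
    have hcY : cnt.getD y 0 = (xs.count y : Int) := hcnt y
    have heY : eqp.getD y 0 = (q2eq xs y : Int) := heqp y
    simp only at hdp hn hs hd
    refine ⟨fun v => ?_, fun v => ?_, ?_, ?_, ?_, ?_⟩
    · -- counts
      simp only [PySem.Dict.getD_insert]
      by_cases hv : v = y
      · subst hv; simp [hcY, List.count_append]
      · simp [hcnt v, List.count_append, List.count_singleton, hv]
        omega
    · -- equal pairs
      simp only [PySem.Dict.getD_insert]
      rw [q2eq_snoc]
      by_cases hv : v = y
      · subst hv; simp [heY, hcY]
      · simp [hv, heqp v]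
    · -- distinct pairs
      simp only [hdp, hn, hcY, p2d_snoc]
      push_cast [Nat.cast_sub hcle]
      ring
    · simp [hn, List.length_append]
    · -- same
      simp only [hs, heY, sCount_snoc]
      push_cast; ring
    · -- diff
      simp only [hd, hdp, hcY, hn, dCount_snoc]
      have hsplit : (q2dAvoid xs y : Int) = (p2d xs : Int) - (p2dTouch xs y : Int) := by
        have := p2d_split xs y
        omega
      have htouch : (p2dTouch xs y : Int) = (xs.count y : Int) * ((xs.length : Int) - (xs.count y : Int)) := by
        rw [p2dTouch_eq]
        push_cast [Nat.cast_sub hcle]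
        ring
      push_cast
      rw [hsplit, htouch]

-- ===== VERDICT (by name: the statement is the Claim_ definition above) =====
theorem count_combinations_spec : Claim_equal_count_combinations := by
  intro numbers _
  unfold Spec_count_combinations
  obtain ⟨_, _, _, _, hs, hd⟩ := inv_foldl numbers
  rw [countA]
  simp only [count_combinations_alt]
  rw [hs, hd]
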